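-- pv_equiv track=rewrite | github.com/EchooooAi/Trying-new- | Data/Iris.py | train_feature_value
-- ===== SOURCE A (Python) =====
-- from collections import defaultdict
-- from operator import  itemgetter
--
-- def train_feature_value(x,classifications,feature_index,feature_value):
--     #分类类别记数
--     class_counts = defaultdict(int)
--     #整个数据集中取每个【个体】以及【个体的类别】，若【个体的特征值】符合【给定的特征值】,【这个类别】符合条件记数+1-->即是找出所有【符合给定特征值】的类别记数情况
--     for sample,classification in zip(x,classifications):
--         if sample[feature_index] == feature_value:
--             class_counts[classification] += 1
--
--     #对【符合给定特征值】类别记数情况进行[降序]排序并取[最大记数]的一种情况下的【类别】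
--     sorted_class_counts = sorted(class_counts.items(),key=itemgetter(1),reverse = True)
--     most_frequent_class = sorted_class_counts[0][0]
--
--     #计算这条规则下的错误率 表示的是分类不适用的个体数量 这里class_value 相当于classification
--     # 如果类别不是最高出现频率类别则 取出来这个类别的记数，组成列表
--     incorrect_predictions = [class_count for class_value,class_count
--                              in class_counts.items()
--                              if class_value != most_frequent_class]
--     error = sum(incorrect_predictions)
--     return most_frequent_class,error
-- ===== SOURCE B (Python) =====
-- from operator import itemgetter
--
-- def train_feature_value(x, classifications, feature_index, feature_value):
--     # One counting pass that also tracks the total number of matching samples;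
--     # the winner is found by a single max scan (first-inserted key wins ties,
--     # matching A's stable reverse sort) and the error is total - winner count.
--     class_counts = {}
--     total = 0
--     for sample, classification in zip(x, classifications):
--         if sample[feature_index] == feature_value:
--             class_counts[classification] = class_counts.get(classification, 0) + 1
--             total += 1
--     most_frequent_class, best_count = max(class_counts.items(), key=itemgetter(1))
--     return most_frequent_class, total - best_count
-- ===== Notes on version B (the rewrite author's own statement) =====
-- stated objective: simpler
-- what changed: B tracks the total number of matching samples inside the single counting loop and picks the winner with one max scan over the counts (Python's max, first maximal item, matches A's stable reverse sort head), computing error = total - winner count, instead of A's descending sort of the items plus a second comprehension summing the non-winner counts.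
import Mathlib
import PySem

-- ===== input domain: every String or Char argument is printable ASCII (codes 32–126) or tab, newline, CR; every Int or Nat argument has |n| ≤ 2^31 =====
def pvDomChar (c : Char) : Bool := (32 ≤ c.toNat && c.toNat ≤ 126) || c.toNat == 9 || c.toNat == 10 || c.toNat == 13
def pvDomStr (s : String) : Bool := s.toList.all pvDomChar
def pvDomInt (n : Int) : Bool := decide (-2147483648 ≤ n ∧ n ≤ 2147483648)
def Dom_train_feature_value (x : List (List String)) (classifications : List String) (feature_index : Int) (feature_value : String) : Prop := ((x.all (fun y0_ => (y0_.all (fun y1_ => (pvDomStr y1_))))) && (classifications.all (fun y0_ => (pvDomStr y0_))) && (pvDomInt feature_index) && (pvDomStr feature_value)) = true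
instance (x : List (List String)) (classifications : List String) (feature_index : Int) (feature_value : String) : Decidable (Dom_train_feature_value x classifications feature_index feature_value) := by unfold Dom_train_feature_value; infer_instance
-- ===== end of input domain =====

-- B replaces A's descending sort + non-winner comprehension by a total tracked in the
-- counting loop, one max scan over the items, and error = total - winner count (objective: simpler).

-- ===== PORT A =====
def train_feature_value (x : List (List String)) (classifications : List String) (feature_index : Int) (feature_value : String) : String × Int :=
  let class_counts : PySem.Dict String Int :=
    (x.zip classifications).foldl
      (fun d sc =>
        -- sample[feature_index] == feature_value; pyGet? = none is IndexError, excluded by Pre_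
        if PySem.List.pyGet? sc.1 feature_index == some feature_value
        then d.modify sc.2 0 (· + 1) else d)
      PySem.Dict.empty
  let sorted_class_counts := PySem.List.sorted class_counts.items (fun p => p.2) true
  match sorted_class_counts with
  | [] => ("", 0)  -- sorted_class_counts[0] raises IndexError here; excluded by Pre_
  | (most_frequent_class, _) :: _ =>
    let incorrect_predictions := (class_counts.items.filter (fun p => !(p.1 == most_frequent_class))).map (fun p => p.2)
    (most_frequent_class, incorrect_predictions.sum)

-- ===== PORT B =====
def train_feature_value_alt (x : List (List String)) (classifications : List String) (feature_index : Int) (feature_value : String) : String × Int :=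
  let st :=
    (x.zip classifications).foldl
      (fun (st : PySem.Dict String Int × Int) sc =>
        if PySem.List.pyGet? sc.1 feature_index == some feature_value
        then (st.1.insert sc.2 (st.1.getD sc.2 0 + 1), st.2 + 1)
        else st)
      (PySem.Dict.empty, 0)
  match PySem.List.max? st.1.items (fun p => p.2) with
  | none => ("", 0)  -- max() raises ValueError here; excluded by Pre_
  | some (most_frequent_class, best_count) => (most_frequent_class, st.2 - best_count)

-- ===== PRECONDITION & SPEC =====
-- Pre_ excludes exactly the inputs where A raises: an out-of-range feature_index for some
-- zipped sample (IndexError), and the no-matching-sample case (IndexError on sorted[0]).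
def Pre_train_feature_value (x : List (List String)) (classifications : List String) (feature_index : Int) (feature_value : String) : Prop :=
  (∀ p ∈ x.zip classifications, PySem.Raise.InRange p.1.length feature_index) ∧
  (∃ p ∈ x.zip classifications, PySem.List.pyGet? p.1 feature_index = some feature_value)
instance (x : List (List String)) (classifications : List String) (feature_index : Int) (feature_value : String) : Decidable (Pre_train_feature_value x classifications feature_index feature_value) := by unfold Pre_train_feature_value; infer_instance
def pvWitness_train_feature_value : List (List String) × List String × Int × String := ([["a"], ["b"]], ["p", "q"], 0, "a")
def Spec_train_feature_value (x : List (List String)) (classifications : List String) (feature_index : Int) (feature_value : String) (out : String × Int) : Prop := out = train_feature_value_alt x classifications feature_index feature_value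
instance (x : List (List String)) (classifications : List String) (feature_index : Int) (feature_value : String) (out : String × Int) : Decidable (Spec_train_feature_value x classifications feature_index feature_value out) := by unfold Spec_train_feature_value; infer_instance

-- ===== CLAIM (what is proved, stated in full; the proofs are below) =====
def Claim_equal_train_feature_value : Prop := ∀ (x : List (List String)) (classifications : List String) (feature_index : Int) (feature_value : String), Dom_train_feature_value x classifications feature_index feature_value → Pre_train_feature_value x classifications feature_index feature_value → Spec_train_feature_value x classifications feature_index feature_value (train_feature_value x classifications feature_index feature_value)

-- ===== LEMMAS AND PROOFS =====

theorem sum_map_intCast (l : List String) (f : String → Nat) :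
    (l.map (fun k => ((f k : Nat) : Int))).sum = ((l.map f).sum : Int) := by
  induction l with
  | nil => simp
  | cons a t ih => simp [ih]

-- A's counting loop is Counter of the matching classifications
theorem tfv_foldA (fi : Int) (fv : String) (l : List (List String × String)) :
    l.foldl (fun d sc => if PySem.List.pyGet? sc.1 fi == some fv then d.modify sc.2 0 (· + 1) else d) PySem.Dict.empty
    = PySem.Dict.counter ((l.filter (fun sc => PySem.List.pyGet? sc.1 fi == some fv)).map Prod.snd) := by
  rw [PySem.List.foldl_if_eq_foldl_filter, PySem.Dict.counter_eq_foldl, List.foldl_map]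

-- B's loop splits into the dict part and the running total (= number of matches)
theorem tfv_foldB (fi : Int) (fv : String) (l : List (List String × String)) (s : PySem.Dict String Int × Int) :
    l.foldl (fun (st : PySem.Dict String Int × Int) sc => if PySem.List.pyGet? sc.1 fi == some fv then (st.1.insert sc.2 (st.1.getD sc.2 0 + 1), st.2 + 1) else st) s
    = (l.foldl (fun d sc => if PySem.List.pyGet? sc.1 fi == some fv then d.insert sc.2 (d.getD sc.2 0 + 1) else d) s.1,
       s.2 + ((l.filter (fun sc => PySem.List.pyGet? sc.1 fi == some fv)).length : Int)) := by
  induction l generalizing s with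
  | nil => simp
  | cons a t ih =>
    simp only [List.foldl_cons, List.filter_cons]
    by_cases h : (PySem.List.pyGet? a.1 fi == some fv) = true
    · rw [if_pos h, if_pos h, ih, h, if_pos rfl]
      simp only [Prod.mk.injEq, List.length_cons]
      exact ⟨trivial, by push_cast; ring⟩
    · rw [if_neg h, if_neg h, ih, Bool.of_not_eq_true h, if_neg (by simp)]

theorem tfv_foldB_dict (fi : Int) (fv : String) (l : List (List String × String)) :
    l.foldl (fun d sc => if PySem.List.pyGet? sc.1 fi == some fv then d.insert sc.2 (d.getD sc.2 0 + 1) else d) PySem.Dict.empty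
    = PySem.Dict.counter ((l.filter (fun sc => PySem.List.pyGet? sc.1 fi == some fv)).map Prod.snd) := by
  rw [PySem.List.foldl_if_eq_foldl_filter, ← PySem.Dict.foldl_insert_getD_add_one_eq_counter, List.foldl_map]

theorem head?_insertBy {α : Type} (bef : α → α → Bool) (y : α) (acc : List α) :
    (PySem.List.insertBy bef y acc).head? =
    (match acc.head? with | none => some y | some m => if bef y m then some y else some m) := by
  cases acc with
  | nil => simp [PySem.List.insertBy]
  | cons h t => simp [PySem.List.insertBy]; split <;> simp

-- head of an insertBy fold = running first-max of the heads
theorem head?_foldl_insertBy {α : Type} (bef : α → α → Bool) (xs : List α) (acc : List α) :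
    (xs.foldl (fun a y => PySem.List.insertBy bef y a) acc).head? =
    xs.foldl (fun o y => match o with | none => some y | some m => if bef y m then some y else some m) acc.head? := by
  induction xs generalizing acc with
  | nil => rfl
  | cons z zs ih => simp only [List.foldl_cons, ih, head?_insertBy]

-- first element of Python's stable descending sort = Python's max (first maximal element)
theorem head?_sorted_rev (xs : List (String × Int)) :
    (PySem.List.sorted xs (fun p => p.2) true).head? = PySem.List.max? xs (fun p => p.2) := by
  simp only [PySem.List.sorted, PySem.List.max?]
  rw [head?_foldl_insertBy]
  simp only [List.head?_nil]
  congr 1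
  funext o y
  cases o <;> simp

-- the crux: on a nonempty Counter, A's sorted-head + non-winner sum equals B's max + subtraction
theorem tfv_core (ms : List String) (total : Int) (htot : total = (ms.length : Int)) (hms : ms ≠ []) :
    (match PySem.List.sorted (PySem.Dict.counter ms).items (fun p => p.2) true with
     | [] => (("" : String), (0 : Int))
     | (c, _) :: _ =>
       (c, (((PySem.Dict.counter ms).items.filter (fun p => !(p.1 == c))).map (fun p => p.2)).sum))
    = (match PySem.List.max? (PySem.Dict.counter ms).items (fun p => p.2) with
       | none => (("" : String), (0 : Int))
       | some (c, n) => (c, total - n)) := by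
  have hitems : (PySem.Dict.counter ms).items
      = (PySem.Set.ofList ms).map (fun k => (k, (ms.count k : Int))) := PySem.Dict.items_counter ms
  obtain ⟨m0, hm0⟩ := List.exists_mem_of_ne_nil ms hms
  have hSne : PySem.Set.ofList ms ≠ [] :=
    List.ne_nil_of_mem ((PySem.Set.mem_ofList ms m0).mpr hm0)
  have hitemsne : (PySem.Dict.counter ms).items ≠ [] := by
    rw [hitems]; simpa using hSne
  cases hmax : PySem.List.max? (PySem.Dict.counter ms).items (fun p => p.2) with
  | none => exact absurd ((PySem.List.max?_eq_none_iff _ _).mp hmax) hitemsne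
  | some m =>
    have hmem : m ∈ (PySem.Dict.counter ms).items := PySem.List.max?_mem hmax
    rw [hitems] at hmem
    obtain ⟨c, hcS, hmc⟩ := List.mem_map.mp hmem
    have hsort := head?_sorted_rev (PySem.Dict.counter ms).items
    rw [hmax] at hsort
    cases hs : PySem.List.sorted (PySem.Dict.counter ms).items (fun p => p.2) true with
    | nil => rw [hs] at hsort; simp at hsort
    | cons hd tl =>
      rw [hs] at hsort
      have hhd : hd = m := by simpa using hsort
      subst hhd
      rw [← hmc]
      have hsum : ((PySem.Set.ofList ms).map (fun k => (ms.count k : Int))).sum = (ms.length : Int) := by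
        rw [sum_map_intCast]
        have hperm : (PySem.Set.ofList ms).Perm ms.dedup :=
          (List.perm_ext_iff_of_nodup (PySem.Set.nodup_ofList ms) (List.nodup_dedup ms)).mpr
            (by intro a; simp [PySem.Set.mem_ofList, List.mem_dedup])
        rw [(hperm.map (fun k => ms.count k)).sum_eq, List.sum_map_count_dedup_eq_length]
      have hperm2 : (PySem.Set.ofList ms).Perm (c :: (PySem.Set.ofList ms).erase c) :=
        List.perm_cons_erase hcS
      have hsplit := (hperm2.map (fun k => (ms.count k : Int))).sum_eq
      rw [List.map_cons, List.sum_cons] at hsplit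
      have herase : ((PySem.Set.ofList ms).filter (fun k => !(k == c)))
          = (PySem.Set.ofList ms).erase c :=
        (List.Nodup.erase_eq_filter (PySem.Set.nodup_ofList ms) c).symm
      simp only [hitems, List.filter_map, List.map_map]
      have hpred : ((fun (p : String × Int) => !(p.1 == c)) ∘ (fun k => (k, (ms.count k : Int))))
          = fun k => !(k == c) := rfl
      rw [hpred, herase]
      have : ((fun (p : String × Int) => p.2) ∘ (fun k => (k, (ms.count k : Int))))
          = fun k => (ms.count k : Int) := rfl
      rw [this]
      refine Prod.ext rfl ?_
      simp only []
      omega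

-- ===== VERDICT (by name: the statement is the Claim_ definition above) =====
theorem train_feature_value_spec : Claim_equal_train_feature_value := by
  intro x classifications fi fv _ hpre
  obtain ⟨-, p, hp, hget⟩ := hpre
  have hmsne : ((x.zip classifications).filter (fun sc => PySem.List.pyGet? sc.1 fi == some fv)).map Prod.snd ≠ [] := by
    have : p ∈ (x.zip classifications).filter (fun sc => PySem.List.pyGet? sc.1 fi == some fv) :=
      List.mem_filter.mpr ⟨hp, by simp [hget]⟩
    exact List.ne_nil_of_mem (List.mem_map_of_mem this)
  unfold Spec_train_feature_value
  simp only [train_feature_value, train_feature_value_alt, tfv_foldA, tfv_foldB, tfv_foldB_dict]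
  exact tfv_core _ (0 + (((x.zip classifications).filter (fun sc => PySem.List.pyGet? sc.1 fi == some fv)).length : Int)) (by simp) hmsne
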